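-- pv_equiv track=rewrite | github.com/mars887/avi-boost-rework | auto-boost-3.0/ab_nvof.py | _select_csv_columns
-- ===== SOURCE A (Python) =====
-- from typing import Dict, Iterable, List, Optional, Sequence, Tuple
--
-- _COLUMN_BASES = {
--     "nvof_mean",
--     "luma_mean",
--     "luma_p25",
--     "luma_p75",
--     "noise_sigma",
--     "grain_ratio",
-- }
--
-- def _select_csv_columns(header: List[str], needed_bases: Iterable[str]) -> Dict[str, str]:
--     mapping: Dict[str, str] = {}
--     for base in needed_bases:
--         if base not in _COLUMN_BASES:
--             continue
--         matches = [h for h in header if h.startswith(base)]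
--         if not matches:
--             raise ValueError(f"CSV column missing for base '{base}'. Header: {header}")
--         if len(matches) > 1:
--             raise ValueError(f"Multiple CSV columns match base '{base}': {matches}")
--         mapping[base] = matches[0]
--     return mapping
-- ===== SOURCE B (Python) =====
-- from typing import Dict, Iterable, List
--
-- _COLUMN_BASES = {
--     "nvof_mean",
--     "luma_mean",
--     "luma_p25",
--     "luma_p75",
--     "noise_sigma",
--     "grain_ratio",
-- }
--
-- _BASE_LIST = ("nvof_mean", "luma_mean", "luma_p25", "luma_p75", "noise_sigma", "grain_ratio")
--
-- def _pick(base: str, buckets: Dict[str, List[str]], header: List[str]) -> str: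
--     matches = buckets.get(base, [])
--     if len(matches) == 1:
--         return matches[0]
--     if matches:
--         raise ValueError(f"Multiple CSV columns match base '{base}': {matches}")
--     raise ValueError(f"CSV column missing for base '{base}'. Header: {header}")
--
-- def _select_csv_columns(header: List[str], needed_bases: Iterable[str]) -> Dict[str, str]:
--     # One pass over header first: bucket each header under every known base it
--     # starts with (header order preserved), then a lookup pass over needed_bases.
--     buckets: Dict[str, List[str]] = {}
--     for h in header:
--         for b in _BASE_LIST:
--             if h.startswith(b):
--                 buckets.setdefault(b, []).append(h)
--     return {base: _pick(base, buckets, header)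
--             for base in needed_bases if base in _COLUMN_BASES}
-- ===== Notes on version B (the rewrite author's own statement) =====
-- stated objective: alternative
-- what changed: Inverts the loop nesting: one header-outer pass builds a base->matching-headers index (buckets), then a lookup pass over needed_bases with a helper replaces A's per-base rescan of header.
import Mathlib
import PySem

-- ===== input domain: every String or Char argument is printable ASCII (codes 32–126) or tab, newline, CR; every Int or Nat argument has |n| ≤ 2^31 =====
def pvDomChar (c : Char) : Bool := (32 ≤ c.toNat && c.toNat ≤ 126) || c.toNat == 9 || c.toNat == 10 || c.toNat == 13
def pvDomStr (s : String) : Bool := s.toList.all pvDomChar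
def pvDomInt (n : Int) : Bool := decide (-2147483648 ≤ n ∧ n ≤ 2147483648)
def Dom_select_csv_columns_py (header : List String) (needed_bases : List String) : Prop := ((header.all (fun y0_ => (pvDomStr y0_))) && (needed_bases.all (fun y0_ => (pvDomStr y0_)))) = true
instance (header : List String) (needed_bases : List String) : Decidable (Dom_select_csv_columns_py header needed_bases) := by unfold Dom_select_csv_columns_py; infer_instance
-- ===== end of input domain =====

-- B inverts A's loop nesting: one header-outer pass builds a base→matching-headers
-- index, then a lookup pass over needed_bases; same return value, objective: alternative.

-- ===== PORT A =====
def pyColumnBases : List String :=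
  ["nvof_mean", "luma_mean", "luma_p25", "luma_p75", "noise_sigma", "grain_ratio"]

-- the for-loop over needed_bases; 'none' = the ValueError raises
def selA_loop (header : List String) (bases : List String) (m : PySem.Dict String String) :
    Option (PySem.Dict String String) :=
  match bases with
  | [] => some m
  | base :: rest =>
    if pyColumnBases.contains base = false then selA_loop header rest m
    else
      let ms := header.filter (fun h => PySem.Str.startswith h base)
      if ms = [] then none
      else if 1 < ms.length then none
      else selA_loop header rest (m.insert base (ms.headD ""))

def select_csv_columns_py (header : List String) (needed_bases : List String) :
    List (String × String) :=
  match selA_loop header needed_bases PySem.Dict.empty with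
  | some m => m.items
  | none => []

-- ===== PORT B =====
-- header-outer pass: buckets.setdefault(b, []).append(h) for every base b that h starts with
def selB_buckets (header : List String) : PySem.Dict String (List String) :=
  header.foldl
    (fun d h =>
      pyColumnBases.foldl
        (fun d b => if PySem.Str.startswith h b then d.modify b [] (fun l => l ++ [h]) else d) d)
    PySem.Dict.empty

-- _pick: the single bucket entry for base; 'none' = one of the two ValueErrors raises
def selB_pick (buckets : PySem.Dict String (List String)) (base : String) : Option String :=
  let ms := buckets.getD base []
  if ms.length = 1 then some (ms.headD "") else none

-- the dict comprehension over needed_bases (raise propagates as none)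
def selB_loop (buckets : PySem.Dict String (List String)) (bases : List String)
    (m : PySem.Dict String String) : Option (PySem.Dict String String) :=
  match bases with
  | [] => some m
  | base :: rest =>
    if pyColumnBases.contains base then
      match selB_pick buckets base with
      | none => none
      | some v => selB_loop buckets rest (m.insert base v)
    else selB_loop buckets rest m

def select_csv_columns_py_alt (header : List String) (needed_bases : List String) :
    List (String × String) :=
  match selB_loop (selB_buckets header) needed_bases PySem.Dict.empty with
  | some m => m.items
  | none => []

-- ===== PRECONDITION & SPEC =====
-- Pre_ excludes exactly the inputs on which A raises ValueError: some needed base among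
-- the known column bases with zero or more than one matching header column.
def Pre_select_csv_columns_py (header : List String) (needed_bases : List String) : Prop :=
  ∀ b ∈ needed_bases,
    b ∈ (["nvof_mean", "luma_mean", "luma_p25", "luma_p75", "noise_sigma", "grain_ratio"] : List String) →
    (header.filter (fun h => PySem.Str.startswith h b)).length = 1

instance (header : List String) (needed_bases : List String) :
    Decidable (Pre_select_csv_columns_py header needed_bases) := by
  unfold Pre_select_csv_columns_py; infer_instance

def pvWitness_select_csv_columns_py : List String × List String :=
  (["nvof_mean_avg", "luma_p25", "other"], ["nvof_mean", "luma_p25", "junk"])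

def Spec_select_csv_columns_py (header : List String) (needed_bases : List String)
    (out : List (String × String)) : Prop := out = select_csv_columns_py_alt header needed_bases

instance (header : List String) (needed_bases : List String) (out : List (String × String)) :
    Decidable (Spec_select_csv_columns_py header needed_bases out) := by
  unfold Spec_select_csv_columns_py; infer_instance

-- ===== CLAIM (what is proved, stated in full; the proofs are below) =====
def Claim_equal_select_csv_columns_py : Prop := ∀ (header : List String) (needed_bases : List String), Dom_select_csv_columns_py header needed_bases → Pre_select_csv_columns_py header needed_bases → Spec_select_csv_columns_py header needed_bases (select_csv_columns_py header needed_bases)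

-- ===== LEMMAS AND PROOFS =====

def selB_innerStep (h : String) :
    PySem.Dict String (List String) → String → PySem.Dict String (List String) :=
  fun d b => if PySem.Str.startswith h b then d.modify b [] (fun l => l ++ [h]) else d

-- folding over bases not containing c leaves bucket c untouched
theorem getD_innerFold_not_mem (bs : List String) (h c : String)
    (d : PySem.Dict String (List String)) (hc : c ∉ bs) :
    (bs.foldl (selB_innerStep h) d).getD c [] = d.getD c [] := by
  induction bs generalizing d with
  | nil => rfl
  | cons b bs ih =>
    simp only [List.mem_cons, not_or] at hc
    rw [List.foldl_cons, ih _ hc.2]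
    unfold selB_innerStep
    by_cases hs : PySem.Str.startswith h b = true
    · rw [if_pos hs, PySem.Dict.getD_modify_of_ne _ _ _ hc.1]
    · rw [if_neg hs]

-- one header's inner pass appends h to exactly the buckets of bases h starts with
theorem getD_innerFold_mem (bs : List String) (h c : String)
    (d : PySem.Dict String (List String)) (hnd : bs.Nodup) (hc : c ∈ bs) :
    (bs.foldl (selB_innerStep h) d).getD c [] =
      d.getD c [] ++ (if PySem.Str.startswith h c then [h] else []) := by
  induction bs generalizing d with
  | nil => cases hc
  | cons b bs ih =>
    simp only [List.nodup_cons] at hnd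
    rcases List.mem_cons.mp hc with rfl | hmem
    · rw [List.foldl_cons, getD_innerFold_not_mem _ _ _ _ hnd.1]
      unfold selB_innerStep
      by_cases hs : PySem.Str.startswith h c = true
      · rw [if_pos hs, if_pos hs, PySem.Dict.getD_modify_self]
      · rw [if_neg hs, if_neg hs, List.append_nil]
    · have hbc : c ≠ b := fun e => hnd.1 (e ▸ hmem)
      rw [List.foldl_cons, ih _ hnd.2 hmem]
      unfold selB_innerStep
      by_cases hs : PySem.Str.startswith h b = true
      · rw [if_pos hs, PySem.Dict.getD_modify_of_ne _ _ _ hbc]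
      · rw [if_neg hs]

-- the whole index pass: bucket c holds exactly the headers starting with c, in order
theorem buckets_getD (header : List String) (c : String)
    (hc : c ∈ pyColumnBases) (d : PySem.Dict String (List String)) :
    (header.foldl (fun d h => pyColumnBases.foldl (selB_innerStep h) d) d).getD c [] =
      d.getD c [] ++ header.filter (fun h => PySem.Str.startswith h c) := by
  induction header generalizing d with
  | nil => simp
  | cons h hs ih =>
    rw [List.foldl_cons, ih, getD_innerFold_mem pyColumnBases h c d (by decide) hc,
      List.filter_cons, List.append_assoc]
    by_cases hsw : PySem.Str.startswith h c = true
    · rw [if_pos hsw, if_pos hsw]; rfl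
    · rw [if_neg hsw, if_neg hsw]; rfl

theorem selB_buckets_getD (header : List String) (c : String) (hc : c ∈ pyColumnBases) :
    (selB_buckets header).getD c [] = header.filter (fun h => PySem.Str.startswith h c) := by
  have := buckets_getD header c hc PySem.Dict.empty
  simpa [selB_buckets, selB_innerStep] using this

theorem loops_eq (header : List String) (bases : List String) (m : PySem.Dict String String) :
    selA_loop header bases m = selB_loop (selB_buckets header) bases m := by
  induction bases generalizing m with
  | nil => rfl
  | cons base rest ih =>
    by_cases hb : pyColumnBases.contains base = false
    · simp only [selA_loop, selB_loop, hb, Bool.false_eq_true, if_false]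
      exact ih m
    · have hb' : pyColumnBases.contains base = true := by
        cases hcb : pyColumnBases.contains base
        · exact absurd hcb hb
        · rfl
      have hmem : base ∈ pyColumnBases := by simpa using hb'
      simp only [selA_loop, selB_loop, selB_pick, hb', if_true,
        selB_buckets_getD header base hmem]
      cases hms : header.filter (fun h => PySem.Str.startswith h base) with
      | nil => simp
      | cons x t =>
        cases t with
        | nil => simpa using ih _
        | cons y t => simp

-- ===== VERDICT (by name: the statement is the Claim_ definition above) =====
theorem select_csv_columns_py_spec : Claim_equal_select_csv_columns_py := by
  intro header needed_bases _ _
  unfold Spec_select_csv_columns_py select_csv_columns_py select_csv_columns_py_alt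
  rw [loops_eq]
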